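-- pv_equiv track=rewrite | github.com/2-H4RD/University | Методы и средства криптографической защиты/Практики/2 Семсетр/Электронные торги/common/gost_28147_89.py | _f
-- ===== SOURCE A (Python) =====
-- SBOX = [
--     [4,10,9,2,13,8,0,14,6,11,1,12,7,15,5,3],
--     [14,11,4,12,6,13,15,10,2,3,8,1,0,7,5,9],
--     [5,8,1,13,10,3,4,2,14,15,12,7,6,0,9,11],
--     [7,13,10,1,0,8,9,15,14,4,6,12,11,2,5,3],
--     [6,12,7,1,5,15,13,8,4,10,9,14,0,3,11,2],
--     [4,11,10,0,7,2,1,13,3,6,8,5,9,12,15,14],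
--     [13,11,4,1,3,15,5,9,0,10,14,7,6,8,2,12],
--     [1,15,13,0,5,7,10,4,9,2,3,14,6,11,8,12],
-- ]
--
-- def _rotl32(x: int, r: int) -> int:
--     return ((x << r) & 0xFFFFFFFF) | (x >> (32 - r))
--
-- def _f(n1: int, k: int) -> int:
--     x = (n1 + k) & 0xFFFFFFFF
--     y = 0
--     for i in range(8):  # S1 на младшем полубайте, S8 на старшем
--         nib = (x >> (4 * i)) & 0xF
--         s = SBOX[i][nib]
--         y |= (s & 0xF) << (4 * i)
--     return _rotl32(y, 11)
-- ===== SOURCE B (Python) =====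
-- SBOX = [
--     [4,10,9,2,13,8,0,14,6,11,1,12,7,15,5,3],
--     [14,11,4,12,6,13,15,10,2,3,8,1,0,7,5,9],
--     [5,8,1,13,10,3,4,2,14,15,12,7,6,0,9,11],
--     [7,13,10,1,0,8,9,15,14,4,6,12,11,2,5,3],
--     [6,12,7,1,5,15,13,8,4,10,9,14,0,3,11,2],
--     [4,11,10,0,7,2,1,13,3,6,8,5,9,12,15,14],
--     [13,11,4,1,3,15,5,9,0,10,14,7,6,8,2,12],
--     [1,15,13,0,5,7,10,4,9,2,3,14,6,11,8,12],
-- ]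
--
-- # Combined per-byte substitution tables, built once at module load with plain
-- # arithmetic: _T[j][b] pushes byte b through S-box rows 2j (low nibble) and
-- # 2j+1 (high nibble) in a single lookup.
-- _T = [
--     [SBOX[2 * j][b % 16] + 16 * SBOX[2 * j + 1][b // 16] for b in range(256)]
--     for j in range(4)
-- ]
--
-- def _f(n1: int, k: int) -> int:
--     x = (n1 + k) % 4294967296
--     # substitute byte by byte, most-significant first, building the word
--     # arithmetically (valid because the four byte substitutions are independent)
--     y = 0
--     for j in (3, 2, 1, 0):
--         y = 256 * y + _T[j][x // 256 ** j % 256]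
--     # rotate left by 11 via divmod: the two halves occupy disjoint bit ranges
--     hi, lo = divmod(y * 2048, 4294967296)
--     return lo + hi
-- ===== Notes on version B (the rewrite author's own statement) =====
-- stated objective: alternative
-- what changed: Replaces the 8-iteration nibble loop over the raw S-box with a 4-iteration most-significant-first byte pass through a 256-entry combined-substitution table precomputed at module load, building the word and the final 11-bit rotation with plain arithmetic (divmod) instead of shifts/OR.
import Mathlib
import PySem

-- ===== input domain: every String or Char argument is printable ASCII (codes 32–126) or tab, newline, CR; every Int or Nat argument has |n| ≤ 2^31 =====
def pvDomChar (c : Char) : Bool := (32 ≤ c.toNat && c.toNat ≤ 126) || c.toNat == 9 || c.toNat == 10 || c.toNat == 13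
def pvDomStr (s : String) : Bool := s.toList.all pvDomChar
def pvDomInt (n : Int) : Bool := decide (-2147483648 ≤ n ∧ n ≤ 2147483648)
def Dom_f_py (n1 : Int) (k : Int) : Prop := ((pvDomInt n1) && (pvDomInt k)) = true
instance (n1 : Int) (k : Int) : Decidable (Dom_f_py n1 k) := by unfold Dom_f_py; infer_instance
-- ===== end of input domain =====

-- B replaces A's 8-step nibble loop (raw S-box, shifts and ORs) by a 4-step
-- most-significant-first byte pass through a precomputed combined-substitution
-- table, assembling the word and the 11-bit rotation with plain arithmetic
-- (256*y + t, divmod); objective: alternative.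

-- The GOST S-box, shared module constant of both Source A and Source B.
def pvSBOX : List (List Nat) := [
    [4,10,9,2,13,8,0,14,6,11,1,12,7,15,5,3],
    [14,11,4,12,6,13,15,10,2,3,8,1,0,7,5,9],
    [5,8,1,13,10,3,4,2,14,15,12,7,6,0,9,11],
    [7,13,10,1,0,8,9,15,14,4,6,12,11,2,5,3],
    [6,12,7,1,5,15,13,8,4,10,9,14,0,3,11,2],
    [4,11,10,0,7,2,1,13,3,6,8,5,9,12,15,14],
    [13,11,4,1,3,15,5,9,0,10,14,7,6,8,2,12],
    [1,15,13,0,5,7,10,4,9,2,3,14,6,11,8,12]]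

-- ===== PORT A =====
-- _rotl32 of Source A (x is a 32-bit Nat here).
def pvRotl32 (x : Nat) (r : Nat) : Nat := ((x <<< r) &&& 0xFFFFFFFF) ||| (x >>> (32 - r))

-- Python `(n1 + k) & 0xFFFFFFFF` on arbitrary ints = mathematical mod 2^32; Lean's Int `%`
-- (emod) with a positive modulus is exactly that, so `((n1+k) % 2^32).toNat` is exact.
def f_py (n1 : Int) (k : Int) : Int :=
  let x : Nat := ((n1 + k) % 4294967296).toNat
  let y : Nat := (List.range 8).foldl (fun y i =>
      let nib := (x >>> (4 * i)) &&& 0xF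
      let s := (pvSBOX.getD i []).getD nib 0
      y ||| ((s &&& 0xF) <<< (4 * i))) 0
  Int.ofNat (pvRotl32 y 11)

-- ===== PORT B =====
-- the precomputed table _T of Source B: _T[j][b] = SBOX[2j][b % 16] + 16*SBOX[2j+1][b // 16]
def pvT : List (List Nat) :=
  (List.range 4).map (fun j => (List.range 256).map (fun b =>
    (pvSBOX.getD (2 * j) []).getD (b % 16) 0 + 16 * (pvSBOX.getD (2 * j + 1) []).getD (b / 16) 0))

-- Python `(n1 + k) % 4294967296`: floor mod with positive modulus = Lean's Int emod, exact.
def f_py_alt (n1 : Int) (k : Int) : Int :=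
  let x : Nat := ((n1 + k) % 4294967296).toNat
  let y : Nat := [3, 2, 1, 0].foldl (fun y j =>
      256 * y + (pvT.getD j []).getD (x / 256 ^ j % 256) 0) 0
  let hi := y * 2048 / 4294967296   -- divmod(y * 2048, 4294967296)
  let lo := y * 2048 % 4294967296
  Int.ofNat (lo + hi)

-- ===== PRECONDITION & SPEC =====
def Spec_f_py (n1 : Int) (k : Int) (out : Int) : Prop := out = f_py_alt n1 k
instance (n1 : Int) (k : Int) (out : Int) : Decidable (Spec_f_py n1 k out) := by unfold Spec_f_py; infer_instance

-- ===== CLAIM (what is proved, stated in full; the proofs are below) =====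
def Claim_equal_f_py : Prop := ∀ (n1 : Int) (k : Int), Dom_f_py n1 k → Spec_f_py n1 k (f_py n1 k)

-- ===== LEMMAS AND PROOFS =====

lemma pv_getD_map_range (n : Nat) (f : Nat → Nat) (i : Nat) (h : i < n) :
    ((List.range n).map f).getD i 0 = f i := by
  simp [List.getD, h]

lemma pv_getD_map_range' {α : Type} [Inhabited α] (n : Nat) (f : Nat → α) (i : Nat) (h : i < n) (d : α) :
    ((List.range n).map f).getD i d = f i := by
  simp [List.getD, h]

-- S-box entries at nibble positions are ≤ 15
lemma pv_sbox_le : ∀ i < 8, ∀ n < 16, (pvSBOX.getD i []).getD n 0 ≤ 15 := by decide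

-- the common value of both loops: the substituted 32-bit word as a weighted sum
def pvSum (x : Nat) : Nat :=
  (pvSBOX.getD 0 []).getD (x % 16) 0 +
    16 * (pvSBOX.getD 1 []).getD (x / 16 % 16) 0 +
    256 * (pvSBOX.getD 2 []).getD (x / 256 % 16) 0 +
    4096 * (pvSBOX.getD 3 []).getD (x / 4096 % 16) 0 +
    65536 * (pvSBOX.getD 4 []).getD (x / 65536 % 16) 0 +
    1048576 * (pvSBOX.getD 5 []).getD (x / 1048576 % 16) 0 +
    16777216 * (pvSBOX.getD 6 []).getD (x / 16777216 % 16) 0 +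
    268435456 * (pvSBOX.getD 7 []).getD (x / 268435456 % 16) 0

lemma pv_sum_lt (x : Nat) : pvSum x < 4294967296 := by
  unfold pvSum
  have h0 := pv_sbox_le 0 (by norm_num) (x % 16) (Nat.mod_lt _ (by norm_num))
  have h1 := pv_sbox_le 1 (by norm_num) (x / 16 % 16) (Nat.mod_lt _ (by norm_num))
  have h2 := pv_sbox_le 2 (by norm_num) (x / 256 % 16) (Nat.mod_lt _ (by norm_num))
  have h3 := pv_sbox_le 3 (by norm_num) (x / 4096 % 16) (Nat.mod_lt _ (by norm_num))
  have h4 := pv_sbox_le 4 (by norm_num) (x / 65536 % 16) (Nat.mod_lt _ (by norm_num))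
  have h5 := pv_sbox_le 5 (by norm_num) (x / 1048576 % 16) (Nat.mod_lt _ (by norm_num))
  have h6 := pv_sbox_le 6 (by norm_num) (x / 16777216 % 16) (Nat.mod_lt _ (by norm_num))
  have h7 := pv_sbox_le 7 (by norm_num) (x / 268435456 % 16) (Nat.mod_lt _ (by norm_num))
  omega

-- A's nibble extraction, arithmetically: (x >>> k) &&& 0xF = x / 2^k % 16
lemma pv_nib_eq (x k : Nat) : (x >>> k) &&& 0xF = x / 2 ^ k % 16 := by
  have h := Nat.and_two_pow_sub_one_eq_mod (x >>> k) 4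
  norm_num at h
  rw [h, Nat.shiftRight_eq_div_pow]

-- the extra `&&& 0xF` A applies to an S-box output (≤ 15) is the identity
lemma pv_mask15 (i n : Nat) (hi : i < 8) (hn : n < 16) :
    (pvSBOX.getD i []).getD n 0 &&& 0xF = (pvSBOX.getD i []).getD n 0 := by
  have hle := pv_sbox_le i hi n hn
  have h := Nat.and_two_pow_sub_one_of_lt_two_pow (show (pvSBOX.getD i []).getD n 0 < 2 ^ 4 by omega)
  norm_num at h
  exact h

-- OR-accumulation of eight disjoint shifted nibbles = their weighted sum
lemma pv_or_sum (a0 a1 a2 a3 a4 a5 a6 a7 : Nat)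
    (h0 : a0 ≤ 15) (h1 : a1 ≤ 15) (h2 : a2 ≤ 15) (h3 : a3 ≤ 15)
    (h4 : a4 ≤ 15) (h5 : a5 ≤ 15) (h6 : a6 ≤ 15) :
    0 ||| a0 <<< 0 ||| a1 <<< 4 ||| a2 <<< 8 ||| a3 <<< 12 ||| a4 <<< 16 |||
        a5 <<< 20 ||| a6 <<< 24 ||| a7 <<< 28 =
      a0 + 16 * a1 + 256 * a2 + 4096 * a3 + 65536 * a4 + 1048576 * a5 +
        16777216 * a6 + 268435456 * a7 := by
  have step : ∀ acc a k : Nat, acc < 2 ^ k → acc ||| a <<< k = a * 2 ^ k + acc := by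
    intro acc a k h
    rw [Nat.or_comm, ← Nat.shiftLeft_add_eq_or_of_lt h, Nat.shiftLeft_eq]
  rw [Nat.zero_or, Nat.shiftLeft_zero]
  rw [step a0 a1 4 (by omega)]
  rw [step _ a2 8 (by norm_num; omega)]
  rw [step _ a3 12 (by norm_num; omega)]
  rw [step _ a4 16 (by norm_num; omega)]
  rw [step _ a5 20 (by norm_num; omega)]
  rw [step _ a6 24 (by norm_num; omega)]
  rw [step _ a7 28 (by norm_num; omega)]
  norm_num
  ring

-- A's loop computes pvSum
lemma pv_yA (x : Nat) :
    (List.range 8).foldl (fun y i =>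
      y ||| (((pvSBOX.getD i []).getD ((x >>> (4 * i)) &&& 0xF) 0 &&& 0xF) <<< (4 * i))) 0 =
      pvSum x := by
  simp only [List.range_succ, List.range_zero, List.foldl_nil, List.foldl_append,
    List.foldl_cons, pv_nib_eq, Nat.reduceMul, Nat.reducePow, Nat.div_one, pow_zero]
  rw [pv_mask15 0 _ (by norm_num) (Nat.mod_lt _ (by norm_num)),
      pv_mask15 1 _ (by norm_num) (Nat.mod_lt _ (by norm_num)),
      pv_mask15 2 _ (by norm_num) (Nat.mod_lt _ (by norm_num)),
      pv_mask15 3 _ (by norm_num) (Nat.mod_lt _ (by norm_num)),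
      pv_mask15 4 _ (by norm_num) (Nat.mod_lt _ (by norm_num)),
      pv_mask15 5 _ (by norm_num) (Nat.mod_lt _ (by norm_num)),
      pv_mask15 6 _ (by norm_num) (Nat.mod_lt _ (by norm_num)),
      pv_mask15 7 _ (by norm_num) (Nat.mod_lt _ (by norm_num))]
  exact pv_or_sum _ _ _ _ _ _ _ _
    (pv_sbox_le 0 (by norm_num) _ (Nat.mod_lt _ (by norm_num)))
    (pv_sbox_le 1 (by norm_num) _ (Nat.mod_lt _ (by norm_num)))
    (pv_sbox_le 2 (by norm_num) _ (Nat.mod_lt _ (by norm_num)))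
    (pv_sbox_le 3 (by norm_num) _ (Nat.mod_lt _ (by norm_num)))
    (pv_sbox_le 4 (by norm_num) _ (Nat.mod_lt _ (by norm_num)))
    (pv_sbox_le 5 (by norm_num) _ (Nat.mod_lt _ (by norm_num)))
    (pv_sbox_le 6 (by norm_num) _ (Nat.mod_lt _ (by norm_num)))

-- B's table lookup at byte j of x, reduced to the two S-box nibble lookups
lemma pv_table_get (x j : Nat) (hj : j < 4) :
    (pvT.getD j []).getD (x / 256 ^ j % 256) 0 =
      (pvSBOX.getD (2 * j) []).getD (x / 2 ^ (4 * (2 * j)) % 16) 0 +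
        16 * (pvSBOX.getD (2 * j + 1) []).getD (x / 2 ^ (4 * (2 * j) + 4) % 16) 0 := by
  have hrow : pvT.getD j [] = (List.range 256).map (fun b =>
      (pvSBOX.getD (2 * j) []).getD (b % 16) 0 + 16 * (pvSBOX.getD (2 * j + 1) []).getD (b / 16) 0) := by
    unfold pvT
    exact pv_getD_map_range' 4 _ j hj []
  have hb : x / 256 ^ j % 256 < 256 := Nat.mod_lt _ (by norm_num)
  rw [hrow, pv_getD_map_range _ _ _ hb]
  have hpow : (256 : Nat) ^ j = 2 ^ (4 * (2 * j)) := by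
    rw [show (256 : Nat) = 2 ^ 8 from rfl, ← Nat.pow_mul]
    ring_nf
  have hlo : x / 256 ^ j % 256 % 16 = x / 2 ^ (4 * (2 * j)) % 16 := by
    rw [Nat.mod_mod_of_dvd _ (by norm_num), hpow]
  have hhi : x / 256 ^ j % 256 / 16 = x / 2 ^ (4 * (2 * j) + 4) % 16 := by
    rw [show (256 : Nat) = 16 * 16 from rfl, Nat.mod_mul_right_div_self, hpow,
        Nat.div_div_eq_div_mul, show (2 : Nat) ^ (4 * (2 * j) + 4) = 2 ^ (4 * (2 * j)) * 16 by
          rw [pow_add]; norm_num]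
  rw [hlo, hhi]

-- B's loop computes pvSum too
lemma pv_yB (x : Nat) :
    [3, 2, 1, 0].foldl (fun y j =>
      256 * y + (pvT.getD j []).getD (x / 256 ^ j % 256) 0) 0 = pvSum x := by
  simp only [List.foldl_cons, List.foldl_nil]
  rw [pv_table_get x 0 (by norm_num), pv_table_get x 1 (by norm_num),
      pv_table_get x 2 (by norm_num), pv_table_get x 3 (by norm_num)]
  simp only [Nat.reduceMul, Nat.reduceAdd, Nat.reducePow, Nat.div_one, pow_zero]
  unfold pvSum
  ring

-- rotate-left-by-11 of a 32-bit word = its divmod form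
lemma pv_rot (y : Nat) (h : y < 4294967296) :
    pvRotl32 y 11 = y * 2048 % 4294967296 + y * 2048 / 4294967296 := by
  unfold pvRotl32
  have hmask : (y <<< 11) &&& 0xFFFFFFFF = (y <<< 11) % 4294967296 := by
    have h32 := Nat.and_two_pow_sub_one_eq_mod (y <<< 11) 32
    norm_num at h32
    exact h32
  rw [hmask, Nat.shiftLeft_eq, Nat.shiftRight_eq_div_pow]
  have e1 : y * 2 ^ 11 % 4294967296 = (y % 2097152) <<< 11 := by
    rw [Nat.shiftLeft_eq]
    norm_num
    omega
  have e2 : y / 2 ^ (32 - 11) = y / 2097152 := by norm_num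
  rw [e1, e2, ← Nat.shiftLeft_add_eq_or_of_lt (show y / 2097152 < 2 ^ 11 by omega),
      Nat.shiftLeft_eq]
  norm_num
  omega

-- ===== VERDICT (by name: the statement is the Claim_ definition above) =====
theorem f_py_spec : Claim_equal_f_py := by
  intro n1 k _
  unfold Spec_f_py
  simp only [f_py, f_py_alt]
  rw [pv_yA, pv_yB, pv_rot _ (pv_sum_lt _)]
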